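-- pv_equiv track=rewrite | github.com/Vergil0327/leetcode-history | Greedy/2Pass/1840. Maximum Building Height/solution.py | maxBuilding
-- ===== SOURCE A (Python) =====
-- from typing import List
--
-- def maxBuilding(n: int, restrictions: List[List[int]]) -> int:
--     restrictions = [[1,0]] + restrictions
--     restrictions.sort()
--     if restrictions[-1][0] < n:
--         restrictions.append([n, n-1])
--
--     m = len(restrictions)
--     for i in range(m-1):
--         a, ha = restrictions[i]
--         b, hb = restrictions[i+1]
--
--         h = ha + abs(b-a)
--
--         # [a,b]之間夠遠
--         if h > hb:
--             diff = h-hb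
--             h = hb + diff//2
--
--         restrictions[i+1][1] = min(h, hb)
--
--     res = 0
--     restrictions.reverse()
--     for i in range(m-1):
--         a, ha = restrictions[i]
--         b, hb = restrictions[i+1]
--
--         h = ha + abs(b-a)
--
--         # [a,b]之間夠遠
--         if h > hb:
--             diff = h-hb
--             h = hb + diff//2
--
--         # find maximum valid height
--         res = max(res, h)
--
--         restrictions[i+1][1] = min(h, hb)
--
--     return res
-- ===== SOURCE B (Python) =====
-- def maxBuilding(n, restrictions):
--     pts = sorted([[1, 0]] + restrictions)
--     if pts[-1][0] < n:
--         pts = pts + [[n, n - 1]]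
--     # Closed form: the tallest feasible height at breakpoint x is
--     # min over all breakpoints (xj, h) of h + |x - xj|.
--     e = [(x, min(h + abs(x - xj) for xj, h in pts)) for x, _ in pts]
--     # Peak between adjacent breakpoints, closed form.
--     return max([0] + [(ea + eb + xb - xa) // 2
--                       for (xa, ea), (xb, eb) in zip(e, e[1:])])
-- ===== Notes on version B (the rewrite author's own statement) =====
-- stated objective: alternative
-- what changed: Replaces A's sequential forward/backward neighbour-clamping passes with the closed-form characterization that the tallest feasible height at each breakpoint x equals min over all breakpoints (xj,hj) of hj+|x-xj|, computed directly per breakpoint, followed by a closed-form peak (ea+eb+gap)//2 per adjacent pair; B does not mutate the caller's inner lists while A does.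
import Mathlib
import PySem

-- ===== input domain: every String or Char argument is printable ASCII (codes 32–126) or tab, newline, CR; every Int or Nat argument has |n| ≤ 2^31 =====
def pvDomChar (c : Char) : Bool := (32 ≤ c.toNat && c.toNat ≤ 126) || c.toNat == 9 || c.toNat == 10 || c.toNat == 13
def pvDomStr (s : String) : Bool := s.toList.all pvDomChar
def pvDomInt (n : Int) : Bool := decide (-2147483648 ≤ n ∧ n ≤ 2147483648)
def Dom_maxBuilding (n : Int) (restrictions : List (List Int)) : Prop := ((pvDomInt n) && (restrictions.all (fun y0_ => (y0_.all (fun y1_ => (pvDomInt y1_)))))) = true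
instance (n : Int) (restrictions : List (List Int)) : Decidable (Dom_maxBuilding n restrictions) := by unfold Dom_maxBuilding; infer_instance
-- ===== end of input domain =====

-- B replaces A's sequential forward/backward neighbour-clamping by the closed-form rule
-- "effective height at breakpoint x = min over all breakpoints (xj,hj) of hj + |x-xj|",
-- then a closed-form peak per adjacent pair (objective: alternative). A mutates the caller's
-- inner lists; B does not — the equivalence proved here is about the RETURN value only.

-- shared helper: Python's 2-tuple unpacking 'a, ha = l'; exact on the length-2 lists Pre_ admits
def pvUnpack2 (l : List Int) : Int × Int := (l.headD 0, (l.drop 1).headD 0)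

-- ===== PORT A =====
-- the duplicated 'h = ha + abs(b-a); if h > hb: h = hb + diff//2' block of both of A's loops
def pvClampA (a ha b hb : Int) : Int :=
  if ha + |b - a| > hb then hb + PySem.Int.floordiv (ha + |b - a| - hb) 2 else ha + |b - a|

-- A's first loop: reads pair (i, i+1), writes restrictions[i+1][1] = min(h, hb)
def pvFwdA : Int → Int → List (List Int) → List (List Int)
  | _, _, [] => []
  | a, ha, l :: rest =>
    let b := (pvUnpack2 l).1
    let hb := (pvUnpack2 l).2
    let h := pvClampA a ha b hb
    [b, min h hb] :: pvFwdA b (min h hb) rest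

-- A's second loop (after reverse): same update, also res = max(res, h)
def pvBwdA : Int → Int → Int → List (List Int) → Int
  | _, _, res, [] => res
  | a, ha, res, l :: rest =>
    let b := (pvUnpack2 l).1
    let hb := (pvUnpack2 l).2
    let h := pvClampA a ha b hb
    pvBwdA b (min h hb) (max res h) rest

def maxBuilding (n : Int) (restrictions : List (List Int)) : Int :=
  let rs1 := @PySem.List.sorted (List Int) (List Int) List.instLinearOrder.toLT
    LinearOrder.toDecidableLT ([1, 0] :: restrictions) (fun l => l) false
  -- restrictions[-1][0]: the list contains [1,0], so the last (greatest) element is nonempty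
  let rs2 := if (((PySem.List.pyGet? rs1 (-1)).getD []).headD 0) < n then rs1 ++ [[n, n - 1]] else rs1
  let rs3 := match rs2 with
    | [] => []
    | l :: rest => l :: pvFwdA (pvUnpack2 l).1 (pvUnpack2 l).2 rest
  match rs3.reverse with
  | [] => 0
  | l :: rest => pvBwdA (pvUnpack2 l).1 (pvUnpack2 l).2 0 rest

-- ===== PORT B =====
-- Source B's 'min(h + abs(x - xj) for xj, h in pts)' (Python min raises on []; pts is never empty)
def pvAbsMin (x : Int) : List (List Int) → Int
  | [] => 0
  | [p] => (pvUnpack2 p).2 + |x - (pvUnpack2 p).1|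
  | p :: rest => min ((pvUnpack2 p).2 + |x - (pvUnpack2 p).1|) (pvAbsMin x rest)

def maxBuilding_alt (n : Int) (restrictions : List (List Int)) : Int :=
  let pts1 := @PySem.List.sorted (List Int) (List Int) List.instLinearOrder.toLT
    LinearOrder.toDecidableLT ([1, 0] :: restrictions) (fun l => l) false
  let pts := if (((PySem.List.pyGet? pts1 (-1)).getD []).headD 0) < n then pts1 ++ [[n, n - 1]] else pts1
  -- e = [(x, min(h + abs(x - xj) for xj, h in pts)) for x, _ in pts]
  let e := pts.map (fun l => ((pvUnpack2 l).1, pvAbsMin (pvUnpack2 l).1 pts))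
  -- max([0] + [(ea + eb + xb - xa) // 2 for (xa, ea), (xb, eb) in zip(e, e[1:])])
  (List.zip e (e.drop 1)).foldl
    (fun res pr => max res (PySem.Int.floordiv (pr.1.2 + pr.2.2 + pr.2.1 - pr.1.1) 2)) 0

-- ===== PRECONDITION & SPEC =====
-- Pre_ excludes exactly the inputs where A raises (ValueError/IndexError unpacking a
-- restriction that is not a length-2 list); B raises there too.
def Pre_maxBuilding (_n : Int) (restrictions : List (List Int)) : Prop :=
  ∀ l ∈ restrictions, l.length = 2
instance (n : Int) (restrictions : List (List Int)) : Decidable (Pre_maxBuilding n restrictions) := by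
  unfold Pre_maxBuilding; infer_instance

def pvWitness_maxBuilding : Int × List (List Int) := (5, [[2, 1], [4, 2]])

def Spec_maxBuilding (n : Int) (restrictions : List (List Int)) (out : Int) : Prop := out = maxBuilding_alt n restrictions
instance (n : Int) (restrictions : List (List Int)) (out : Int) : Decidable (Spec_maxBuilding n restrictions out) := by unfold Spec_maxBuilding; infer_instance

-- ===== CLAIM (what is proved, stated in full; the proofs are below) =====
def Claim_equal_maxBuilding : Prop := ∀ (n : Int) (restrictions : List (List Int)), Dom_maxBuilding n restrictions → Pre_maxBuilding n restrictions → Spec_maxBuilding n restrictions (maxBuilding n restrictions)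

-- ===== LEMMAS AND PROOFS =====

-- the clamped chain both programs' values factor through, abstracted over the clamp rule g
def pvChain (g : Int × Int → Int × Int → Int) : Option (Int × Int) → List (Int × Int) → List (Int × Int)
  | _, [] => []
  | none, c :: t => c :: pvChain g (some c) t
  | some p, c :: t => (c.1, g p c) :: pvChain g (some (c.1, g p c)) t

def pvGF (p c : Int × Int) : Int := min c.2 (p.2 + c.1 - p.1)
def pvGB (p c : Int × Int) : Int := min c.2 (p.2 + p.1 - c.1)

-- peak values of adjacent pairs, on an x-DECREASING list
def pvPks : List (Int × Int) → List Int
  | p :: q :: t => (p.2 + q.2 + (p.1 - q.1)) / 2 :: pvPks (q :: t)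
  | _ => []

-- peak values of adjacent pairs, on an x-INCREASING list
def pvPksF : List (Int × Int) → List Int
  | p :: q :: t => (p.2 + q.2 + (q.1 - p.1)) / 2 :: pvPksF (q :: t)
  | _ => []

-- min of a nonempty Int list (0 on [] — never used on [])
def nmin : List Int → Int
  | [] => 0
  | [a] => a
  | a :: b :: t => min a (nmin (b :: t))

def pvF (c : Int × Int) : Int := c.2 - c.1
def pvG (c : Int × Int) : Int := c.2 + c.1
def pvE (x : Int) (c : Int × Int) : Int := c.2 + |x - c.1|

-- forward-clamp values in "2x + running min of (h-x)" form
def pvT (m : Int) : List (Int × Int) → List Int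
  | [] => []
  | c :: t => (2 * c.1 + min m (pvF c)) :: pvT (min m (pvF c)) t

-- backward-clamp values in "min(h, M - x), M = running min of (h+x)" form
def pvV (M : Int) : List (Int × Int) → List Int
  | [] => []
  | c :: t => (min c.2 (M - c.1)) :: pvV (min M (pvG c)) t

lemma pv_len2_eq (l : List Int) (h : l.length = 2) : l = [(pvUnpack2 l).1, (pvUnpack2 l).2] := by
  match l, h with
  | [a, b], _ => rfl

lemma pv_le_head (a ha b hb : Int) (h : ([a, ha] : List Int) ≤ [b, hb]) : a ≤ b := by
  by_contra hc
  push Not at hc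
  exact absurd (List.Lex.rel hc : ([b, hb] : List Int) < [a, ha]) (not_lt.mpr h)

-- A's forward update equals the plain clamp min(hb, ha + (b-a))
lemma pv_clamp_fwd (a ha b hb : Int) (hab : a ≤ b) :
    min (pvClampA a ha b hb) hb = min hb (ha + b - a) := by
  unfold pvClampA
  rw [abs_of_nonneg (by omega : (0:Int) ≤ b - a)]
  split_ifs with h
  · rw [PySem.Int.floordiv_eq_ediv_of_pos (by norm_num)]
    omega
  · omega

-- A's backward h equals the closed-form peak over the clamped pair
lemma pv_clamp_bwd (a ha b hb : Int) (hba : b ≤ a) :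
    pvClampA a ha b hb = (ha + min hb (ha + a - b) + (a - b)) / 2 := by
  unfold pvClampA
  rw [abs_of_nonpos (by omega : b - a ≤ 0)]
  split_ifs with h
  · rw [PySem.Int.floordiv_eq_ediv_of_pos (by norm_num)]
    omega
  · omega

lemma pv_clamp_bwd_min (a ha b hb : Int) (hba : b ≤ a) :
    min (pvClampA a ha b hb) hb = min hb (ha + a - b) := by
  unfold pvClampA
  rw [abs_of_nonpos (by omega : b - a ≤ 0)]
  split_ifs with h
  · rw [PySem.Int.floordiv_eq_ediv_of_pos (by norm_num)]
    omega
  · omega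

lemma pv_chain_fst (g : Int × Int → Int × Int → Int) :
    ∀ (p : Option (Int × Int)) (L : List (Int × Int)),
      (pvChain g p L).map Prod.fst = L.map Prod.fst := by
  intro p L
  induction L generalizing p with
  | nil => cases p <;> rfl
  | cons c t ih => cases p <;> simp [pvChain, ih]

lemma pv_chain_length (g : Int × Int → Int × Int → Int) (p : Option (Int × Int))
    (L : List (Int × Int)) : (pvChain g p L).length = L.length := by
  have := congrArg List.length (pv_chain_fst g p L)
  simpa using this

-- A's forward loop is the gF-chain (needs x-sortedness to drop abs)
lemma pv_fwdA_chain :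
    ∀ (L : List (List Int)) (a ha : Int),
      (∀ l ∈ L, l.length = 2) →
      List.IsChain (· ≤ ·) (a :: L.map (fun l => (pvUnpack2 l).1)) →
      pvFwdA a ha L = (pvChain pvGF (some (a, ha)) (L.map pvUnpack2)).map (fun p => [p.1, p.2]) := by
  intro L
  induction L with
  | nil => intro a ha _ _; rfl
  | cons l t ih =>
    intro a ha hlen hch
    simp only [List.map_cons, List.isChain_cons_cons] at hch
    have hab : a ≤ (pvUnpack2 l).1 := hch.1
    simp only [pvFwdA, List.map_cons, pvChain, pvGF]
    rw [pv_clamp_fwd a ha (pvUnpack2 l).1 (pvUnpack2 l).2 hab]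
    congr 1
    exact ih (pvUnpack2 l).1 (min (pvUnpack2 l).2 (ha + (pvUnpack2 l).1 - a))
      (fun x hx => hlen x (List.mem_cons_of_mem _ hx)) hch.2

-- A's backward loop computes foldl max over the peaks of the gB-chain
lemma pv_bwdA_chain :
    ∀ (L : List (List Int)) (a ha res : Int),
      (∀ l ∈ L, l.length = 2) →
      List.IsChain (fun x y : Int => y ≤ x) (a :: L.map (fun l => (pvUnpack2 l).1)) →
      pvBwdA a ha res L =
        List.foldl max res (pvPks ((a, ha) :: pvChain pvGB (some (a, ha)) (L.map pvUnpack2))) := by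
  intro L
  induction L with
  | nil => intro a ha res _ _; rfl
  | cons l t ih =>
    intro a ha res hlen hch
    simp only [List.map_cons, List.isChain_cons_cons] at hch
    have hba : (pvUnpack2 l).1 ≤ a := hch.1
    simp only [pvBwdA, List.map_cons, pvChain, pvPks, pvGB, List.foldl_cons]
    rw [pv_clamp_bwd_min a ha (pvUnpack2 l).1 (pvUnpack2 l).2 hba,
        pv_clamp_bwd a ha (pvUnpack2 l).1 (pvUnpack2 l).2 hba]
    have := ih (pvUnpack2 l).1 (min (pvUnpack2 l).2 (ha + a - (pvUnpack2 l).1))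
      (max res ((ha + min (pvUnpack2 l).2 (ha + a - (pvUnpack2 l).1) + (a - (pvUnpack2 l).1)) / 2))
      (fun x hx => hlen x (List.mem_cons_of_mem _ hx)) hch.2
    rw [this]

-- B's zip fold is foldl max over the forward peak list
lemma pv_zip_fold :
    ∀ (C : List (Int × Int)) (res : Int),
      (List.zip C (C.drop 1)).foldl
        (fun res pr => max res (PySem.Int.floordiv (pr.1.2 + pr.2.2 + pr.2.1 - pr.1.1) 2)) res =
      List.foldl max res (pvPksF C) := by
  intro C
  induction C with
  | nil => intro res; rfl
  | cons p t ih =>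
    intro res
    cases t with
    | nil => rfl
    | cons q t' =>
      simp only [List.drop_succ_cons, List.drop_zero, List.zip_cons_cons, List.foldl_cons, pvPksF]
      rw [PySem.Int.floordiv_eq_ediv_of_pos (by norm_num),
          (by ring : p.2 + q.2 + q.1 - p.1 = p.2 + q.2 + (q.1 - p.1))]
      have h2 := ih (max res ((p.2 + q.2 + (q.1 - p.1)) / 2))
      simpa using h2

lemma pv_pksF_concat :
    ∀ (xs : List (Int × Int)) (q : Int × Int),
      pvPksF (xs ++ [q]) = pvPksF xs ++
        (match xs.getLast? with
         | some p => [(p.2 + q.2 + (q.1 - p.1)) / 2]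
         | none => []) := by
  intro xs q
  induction xs with
  | nil => rfl
  | cons p t ih =>
    cases t with
    | nil => rfl
    | cons p' t' =>
      simp only [List.cons_append, pvPksF] at *
      rw [ih]
      rfl

lemma pv_pksF_reverse : ∀ (l : List (Int × Int)), pvPksF l.reverse = (pvPks l).reverse := by
  intro l
  induction l with
  | nil => rfl
  | cons q t ih =>
    cases t with
    | nil => rfl
    | cons p t' =>
      have hrev : (q :: p :: t').reverse = (p :: t').reverse ++ [q] := by simp
      rw [hrev, pv_pksF_concat, ih]
      have hlast : (p :: t').reverse.getLast? = some p := by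
        simp [List.getLast?_reverse]
      rw [hlast]
      simp only [pvPks, List.reverse_cons]
      congr 2
      omega

lemma pv_foldl_max_shift : ∀ (l : List Int) (i a : Int),
    List.foldl max (max i a) l = max (List.foldl max i l) a := by
  intro l
  induction l with
  | nil => intro i a; rfl
  | cons x t ih =>
    intro i a
    simp only [List.foldl_cons]
    rw [← ih]
    congr 1
    omega

lemma pv_foldl_max_reverse : ∀ (l : List Int) (i : Int),
    List.foldl max i l.reverse = List.foldl max i l := by
  intro l
  induction l with
  | nil => intro i; rfl
  | cons x t ih =>
    intro i
    simp only [List.reverse_cons, List.foldl_append, List.foldl_cons, List.foldl_nil]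
    rw [ih, pv_foldl_max_shift]

-- sortedness of the list of lists gives a chain on the x-coordinates
lemma pv_heads_chain :
    ∀ (L : List (List Int)), (∀ l ∈ L, l.length = 2) → L.Pairwise (· ≤ ·) →
      List.IsChain (· ≤ ·) (L.map (fun l => (pvUnpack2 l).1)) := by
  intro L
  induction L with
  | nil => intro _ _; simp
  | cons l t ih =>
    intro hlen hpw
    rw [List.pairwise_cons] at hpw
    have hct := ih (fun x hx => hlen x (List.mem_cons_of_mem _ hx)) hpw.2
    cases t with
    | nil => simp
    | cons l' t' =>
      simp only [List.map_cons, List.isChain_cons_cons]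
      refine ⟨?_, hct⟩
      have h1 := hlen l (List.mem_cons_self)
      have h2 := hlen l' (List.mem_cons_of_mem _ List.mem_cons_self)
      have hle : l ≤ l' := hpw.1 l' List.mem_cons_self
      rw [pv_len2_eq l h1, pv_len2_eq l' h2] at hle
      exact pv_le_head _ _ _ _ hle

lemma pv_pyGet_neg_one (xs : List (List Int)) (hx : xs ≠ []) :
    PySem.List.pyGet? xs (-1) = xs.getLast? := by
  simp [PySem.List.pyGet?, PySem.List.pyIdx?]
  rw [if_pos (by simpa [Nat.one_le_iff_ne_zero, List.length_eq_zero_iff] using hx)]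
  simp [List.getLast?_eq_getElem?]

lemma pv_unpack_pair (p : Int × Int) : pvUnpack2 [p.1, p.2] = p := rfl

-- ===== nmin lemmas =====
lemma nmin_cons (a : Int) (l : List Int) (h : l ≠ []) : nmin (a :: l) = min a (nmin l) := by
  cases l with
  | nil => exact absurd rfl h
  | cons b t => rfl

lemma nmin_le : ∀ (l : List Int) (x : Int), x ∈ l → nmin l ≤ x := by
  intro l
  induction l with
  | nil => intro x hx; simp at hx
  | cons a t ih =>
    intro x hx
    cases t with
    | nil => simp at hx; simp [nmin, hx]
    | cons b t' =>
      rw [nmin_cons a _ (by simp)]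
      rcases List.mem_cons.mp hx with h | h
      · omega
      · have := ih x h; omega

lemma nmin_mem : ∀ (l : List Int), l ≠ [] → nmin l ∈ l := by
  intro l
  induction l with
  | nil => intro h; exact absurd rfl h
  | cons a t ih =>
    intro _
    cases t with
    | nil => simp [nmin]
    | cons b t' =>
      rw [nmin_cons a _ (by simp)]
      rcases le_total a (nmin (b :: t')) with h | h
      · simp [min_eq_left h]
      · have := ih (by simp)
        simp only [min_eq_right h]
        exact List.mem_cons_of_mem _ this

lemma nmin_append : ∀ (l1 l2 : List Int), l1 ≠ [] → l2 ≠ [] →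
    nmin (l1 ++ l2) = min (nmin l1) (nmin l2) := by
  intro l1
  induction l1 with
  | nil => intro l2 h _; exact absurd rfl h
  | cons a t ih =>
    intro l2 _ h2
    cases t with
    | nil =>
      simp only [List.cons_append, List.nil_append]
      rw [nmin_cons a l2 h2]
      rfl
    | cons b t' =>
      have htl : (b :: t') ++ l2 ≠ [] := by simp
      simp only [List.cons_append]
      rw [nmin_cons a _ (by simp), nmin_cons a (b :: t') (by simp)]
      rw [← List.cons_append, ih l2 (by simp) h2]
      omega

lemma nmin_reverse (l : List Int) : nmin l.reverse = nmin l := by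
  cases hl : l with
  | nil => rfl
  | cons a t =>
    have h1 : l.reverse ≠ [] := by simp [hl]
    have h2 : l ≠ [] := by simp [hl]
    rw [← hl] at *
    refine le_antisymm ?_ ?_
    · exact nmin_le _ _ (List.mem_reverse.mpr (nmin_mem l h2))
    · exact nmin_le _ _ (by rw [← List.mem_reverse]; exact nmin_mem _ h1)

lemma nmin_dup (a : Int) (l : List Int) (h : a ∈ l) : nmin (a :: l) = nmin l := by
  rw [nmin_cons a l (List.ne_nil_of_mem h)]
  have := nmin_le l a h
  omega

lemma nmin_map_add : ∀ (l : List Int) (x : Int), l ≠ [] →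
    nmin (l.map (fun v => x + v)) = x + nmin l := by
  intro l
  induction l with
  | nil => intro x h; exact absurd rfl h
  | cons a t ih =>
    intro x _
    cases t with
    | nil => simp [nmin]
    | cons b t' =>
      simp only [List.map_cons]
      rw [nmin_cons a (b :: t') (by simp),
          nmin_cons (x + a) _ (by simp)]
      have := ih x (by simp)
      simp only [List.map_cons] at this
      rw [this]
      omega

lemma nmin_minhead (a b : Int) (l : List Int) : nmin (min a b :: l) = nmin (a :: b :: l) := by
  cases l with
  | nil => simp [nmin]
  | cons c t =>
    rw [nmin_cons _ (c :: t) (by simp), nmin_cons a (b :: c :: t) (by simp),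
        nmin_cons b (c :: t) (by simp)]
    omega

lemma foldl_min_nmin : ∀ (l : List Int) (m : Int), l.foldl min m = nmin (m :: l) := by
  intro l
  induction l with
  | nil => intro m; rfl
  | cons a t ih =>
    intro m
    simp only [List.foldl_cons]
    rw [ih, nmin_minhead]

-- ===== pvT / pvV lemmas =====
lemma pvT_length : ∀ (L : List (Int × Int)) (m : Int), (pvT m L).length = L.length := by
  intro L
  induction L with
  | nil => intro m; rfl
  | cons c t ih => intro m; simp [pvT, ih]

lemma pvV_length : ∀ (L : List (Int × Int)) (M : Int), (pvV M L).length = L.length := by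
  intro L
  induction L with
  | nil => intro M; rfl
  | cons c t ih => intro M; simp [pvV, ih]

lemma pvT_append : ∀ (A B : List (Int × Int)) (m : Int),
    pvT m (A ++ B) = pvT m A ++ pvT (A.foldl (fun a c => min a (pvF c)) m) B := by
  intro A
  induction A with
  | nil => intro B m; rfl
  | cons c t ih =>
    intro B m
    simp only [List.cons_append, pvT, List.foldl_cons]
    rw [ih]

-- forward chain's h+x values are the pvT list
lemma pv_chainF_T : ∀ (t : List (Int × Int)) (p : Int × Int),
    (pvChain pvGF (some p) t).map pvG = pvT (pvF p) t := by
  intro t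
  induction t with
  | nil => intro p; rfl
  | cons c t' ih =>
    intro p
    simp only [pvChain, List.map_cons, pvT]
    have hcar : pvF ((c.1, pvGF p c)) = min (pvF p) (pvF c) := by
      simp [pvF, pvGF]; omega
    rw [ih ((c.1, pvGF p c)), hcar]
    congr 1
    simp [pvG, pvGF, pvF]
    omega

-- backward chain's values are the pvV list
lemma pv_chainB_V : ∀ (t : List (Int × Int)) (q : Int × Int),
    (pvChain pvGB (some q) t).map Prod.snd = pvV (pvG q) t := by
  intro t
  induction t with
  | nil => intro q; rfl
  | cons c t' ih =>
    intro q
    simp only [pvChain, List.map_cons, pvV]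
    have hcar : pvG ((c.1, pvGB q c)) = min (pvG q) (pvG c) := by
      simp [pvG, pvGB]; omega
    rw [ih ((c.1, pvGB q c)), hcar]
    congr 1

lemma pvV_getElem : ∀ (L : List (Int × Int)) (M : Int) (k : Nat) (hk : k < L.length),
    (pvV M L)[k]'(by rw [pvV_length]; exact hk) =
      nmin (M :: (L.take (k + 1)).map pvG) - (L[k]'hk).1 := by
  intro L
  induction L with
  | nil => intro M k hk; simp at hk
  | cons c t ih =>
    intro M k hk
    cases k with
    | zero =>
      simp [pvV, nmin, pvG]
      omega
    | succ k' =>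
      have hk' : k' < t.length := by simpa using hk
      simp only [pvV, List.getElem_cons_succ]
      rw [ih (min M (pvG c)) k' hk']
      simp only [List.take_succ_cons, List.map_cons]
      rw [nmin_minhead]

-- running min over a suffix of pvT collapses to the closed "peak at head, then g-values" form
lemma pv_TL : ∀ (t : List (Int × Int)) (c : Int × Int) (m : Int),
    ((c :: t).map Prod.fst).Pairwise (· ≤ ·) →
    nmin (pvT m (c :: t)) = nmin ((2 * c.1 + min m (pvF c)) :: t.map pvG) := by
  intro t
  induction t with
  | nil => intro c m _; rfl
  | cons c' t' ih =>
    intro c m hpw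
    have hcc' : c.1 ≤ c'.1 := by
      simp only [List.map_cons, List.pairwise_cons] at hpw
      exact hpw.1 c'.1 (by simp)
    have hpw' : ((c' :: t').map Prod.fst).Pairwise (· ≤ ·) := by
      simp only [List.map_cons, List.pairwise_cons] at hpw ⊢
      exact hpw.2
    have hstep : pvT m (c :: c' :: t')
        = (2 * c.1 + min m (pvF c)) :: pvT (min m (pvF c)) (c' :: t') := rfl
    rw [hstep, nmin_cons _ _ (by simp [pvT]), ih c' (min m (pvF c)) hpw']
    simp only [List.map_cons]
    cases t' with
    | nil =>
      simp only [List.map_nil, nmin]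
      simp [pvF, pvG]
      omega
    | cons d t'' =>
      rw [nmin_cons (2 * c'.1 + min (min m (pvF c)) (pvF c')) _ (by simp),
          nmin_cons (2 * c.1 + min m (pvF c)) _ (by simp),
          nmin_cons (pvG c') _ (by simp)]
      simp only [pvF, pvG]
      omega

-- index monotonicity of the x-coordinates from pairwise sortedness
lemma pv_mono (P : List (Int × Int)) (hpw : (P.map Prod.fst).Pairwise (· ≤ ·))
    (j k : Nat) (hj : j < P.length) (hk : k < P.length) (hjk : j ≤ k) :
    (P[j]'hj).1 ≤ (P[k]'hk).1 := by
  rcases Nat.lt_or_ge j k with h | h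
  · have := (List.pairwise_iff_getElem.mp hpw) j k (by simpa using hj) (by simpa using hk) h
    simpa using this
  · have : j = k := by omega
    subst this; exact le_rfl

-- the split of the closed-form min at index i
lemma pv_e_split (P : List (Int × Int)) (hpw : (P.map Prod.fst).Pairwise (· ≤ ·))
    (i : Nat) (hi : i < P.length) :
    nmin ((2 * (P[i]'hi).1 + nmin ((P.take (i + 1)).map pvF)) :: (P.drop (i + 1)).map pvG)
      = (P[i]'hi).1 + nmin (P.map (pvE (P[i]'hi).1)) := by
  set x := (P[i]'hi).1 with hx
  have htk : P.take (i + 1) ≠ [] := by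
    have : (P.take (i + 1)).length = i + 1 := by
      rw [List.length_take]; omega
    intro h; rw [h] at this; simp at this
  -- membership-index facts
  have hA : ∀ c ∈ P.take (i + 1), pvE x c = x + pvF c := by
    intro c hc
    obtain ⟨j, hj, hcj⟩ := List.mem_iff_getElem.mp hc
    have hj' : j < P.length := by
      have : j < min (i + 1) P.length := by simpa [List.length_take] using hj
      omega
    have : c = P[j]'hj' := by rw [← hcj, List.getElem_take]
    subst this
    have hjle : j ≤ i := by
      have : j < min (i + 1) P.length := by simpa [List.length_take] using hj
      omega
    have hle : (P[j]'hj').1 ≤ x := hx ▸ pv_mono P hpw j i hj' hi hjle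
    simp [pvE, pvF, abs_of_nonneg (by omega : (0:Int) ≤ x - (P[j]'hj').1)]
    omega
  have hB : ∀ c ∈ P.drop (i + 1), pvE x c = pvG c - x := by
    intro c hc
    obtain ⟨j, hj, hcj⟩ := List.mem_iff_getElem.mp hc
    have hj' : i + 1 + j < P.length := by
      have : j < P.length - (i + 1) := by simpa [List.length_drop] using hj
      omega
    have : c = P[i + 1 + j]'hj' := by rw [← hcj, List.getElem_drop]
    subst this
    have hle : x ≤ (P[i + 1 + j]'hj').1 := hx ▸ pv_mono P hpw i (i + 1 + j) hi hj' (by omega)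
    simp [pvE, pvG, abs_of_nonpos (by omega : x - (P[i + 1 + j]'hj').1 ≤ 0)]
    omega
  have hsplit : P.map (pvE x) = (P.take (i + 1)).map (pvE x) ++ (P.drop (i + 1)).map (pvE x) := by
    rw [← List.map_append, List.take_append_drop]
  have hAmap : (P.take (i + 1)).map (pvE x) = ((P.take (i + 1)).map pvF).map (fun v => x + v) := by
    rw [List.map_map]
    exact List.map_congr_left (fun c hc => by simpa using hA c hc)
  have hBmap : (P.drop (i + 1)).map (pvE x) = ((P.drop (i + 1)).map pvG).map (fun v => -x + v) := by
    rw [List.map_map]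
    refine List.map_congr_left (fun c hc => ?_)
    have := hB c hc
    simp only [Function.comp_apply]
    omega
  have hAne : (P.take (i + 1)).map pvF ≠ [] := by simpa using htk
  cases hdrop : P.drop (i + 1) with
  | nil =>
    rw [hsplit, hdrop]
    simp only [List.map_nil, List.append_nil, nmin]
    rw [hAmap, nmin_map_add _ x hAne]
    omega
  | cons d t =>
    have hdne : (P.drop (i + 1)).map pvG ≠ [] := by rw [hdrop]; simp
    have hEne2 : (P.drop (i + 1)).map (pvE x) ≠ [] := by rw [hdrop]; simp
    rw [hsplit, nmin_append _ _ (by simpa using htk) hEne2,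
        hAmap, hBmap, nmin_map_add _ x hAne, nmin_map_add _ (-x) hdne]
    rw [nmin_cons _ _ (by rw [← hdrop] at *; simpa using hdne)]
    rw [hdrop]
    omega

-- carry entering the suffix at i, rewritten as the min over the first i+1 f-values
lemma pv_carry (P : List (Int × Int)) (p0 : Int × Int) (h0 : P ≠ [] ∧ P.headD (0,0) = p0)
    (i : Nat) (hi : i < P.length) :
    min (nmin (pvF p0 :: (P.take i).map pvF)) (pvF (P[i]'hi))
      = nmin ((P.take (i + 1)).map pvF) := by
  obtain ⟨hne, hhd⟩ := h0
  have htk1 : P.take (i + 1) = P.take i ++ [P[i]'hi] := List.take_succ_eq_append_getElem hi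
  cases i with
  | zero =>
    simp only [List.take_zero, List.map_nil]
    rw [htk1]
    simp only [List.take_zero, List.nil_append, List.map_cons, List.map_nil, nmin]
    have : P[0]'hi = p0 := by
      cases P with
      | nil => simp at hne
      | cons a t => simpa using hhd
    rw [this]
    simp
  | succ i' =>
    have hp0mem : p0 ∈ P.take (i' + 1) := by
      cases P with
      | nil => simp at hne
      | cons a t =>
        have : a = p0 := by simpa using hhd
        subst this
        simp [List.take_succ_cons]
    have hdup : nmin (pvF p0 :: (P.take (i' + 1)).map pvF) = nmin ((P.take (i' + 1)).map pvF) :=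
      nmin_dup _ _ (List.mem_map_of_mem hp0mem)
    rw [hdup, htk1, List.map_append]
    rw [nmin_append _ _ (by
        have : (P.take (i' + 1)).length = i' + 1 := by rw [List.length_take]; omega
        intro h
        rw [List.map_eq_nil_iff] at h
        rw [h] at this; simp at this) (by simp)]
    simp [nmin]

-- MAIN: the composed clamp chains compute exactly B's closed-form effective heights
lemma pv_main2 (P : List (Int × Int)) (hne : P ≠ [])
    (hpw : (P.map Prod.fst).Pairwise (· ≤ ·)) :
    (pvChain pvGB none (pvChain pvGF none P).reverse).reverse
      = P.map (fun c => (c.1, nmin (P.map (pvE c.1)))) := by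
  cases P with
  | nil => exact absurd rfl hne
  | cons p0 rest =>
  set P := p0 :: rest with hP
  set F := pvChain pvGF none P with hF
  have hFc : F = p0 :: pvChain pvGF (some p0) rest := rfl
  have hFfst : F.map Prod.fst = P.map Prod.fst := pv_chain_fst _ _ _
  have hFlen : F.length = P.length := pv_chain_length _ _ _
  have hFg : F.map pvG = pvT (pvF p0) P := by
    rw [hFc, List.map_cons, pv_chainF_T]
    show pvG p0 :: pvT (pvF p0) rest = pvT (pvF p0) (p0 :: rest)
    simp only [pvT, min_self]
    congr 1
    simp [pvG, pvF]; omega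
  have hFne : F ≠ [] := by rw [hFc]; simp
  obtain ⟨q0, R, hqR⟩ : ∃ q0 R, F.reverse = q0 :: R := by
    cases hrev : F.reverse with
    | nil => exact absurd (List.reverse_eq_nil_iff.mp hrev) hFne
    | cons a b => exact ⟨a, b, rfl⟩
  set G := pvChain pvGB none F.reverse with hG
  have hGc : G = q0 :: pvChain pvGB (some q0) R := by rw [hG, hqR]; rfl
  have hGsnd : G.map Prod.snd = pvV (pvG q0) F.reverse := by
    rw [hGc, List.map_cons, pv_chainB_V, hqR]
    show q0.2 :: pvV (pvG q0) R = pvV (pvG q0) (q0 :: R)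
    simp only [pvV, min_self]
    congr 1
    simp [pvG]
  have hGfst : G.map Prod.fst = F.reverse.map Prod.fst := pv_chain_fst _ _ _
  have hGlen : G.length = P.length := by
    rw [pv_chain_length]; simpa using hFlen
  set m := P.length with hm
  have hmpos : 0 < m := by rw [hm, hP]; simp
  apply List.ext_getElem
  · simp [hGlen, hm]
  intro i hi1 hi2
  have him : i < m := by simpa [hGlen] using hi1
  have hgi : G.reverse[i]'hi1 = G[m - 1 - i]'(by rw [hGlen]; omega) := by
    rw [List.getElem_reverse]
    congr 1
    omega
  set k := m - 1 - i with hk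
  have hkm : k < m := by omega
  have hkG : k < G.length := by rw [hGlen]; exact hkm
  have hkFr : k < F.reverse.length := by simp [hFlen]; omega
  -- fst component
  have efst : G.map Prod.fst = (P.map Prod.fst).reverse := by
    rw [hGfst, List.map_reverse, hFfst]
  have hfst : (G[k]'hkG).1 = (P[i]'(by omega)).1 := by
    calc (G[k]'hkG).1
        = (G.map Prod.fst)[k]'(by simpa [hGlen] using hkm) := (List.getElem_map _).symm
      _ = ((P.map Prod.fst).reverse)[k]'(by simpa using hkm) := List.getElem_of_eq efst _
      _ = (P.map Prod.fst)[(P.map Prod.fst).length - 1 - k]'(by simp; omega) :=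
          List.getElem_reverse _
      _ = (P.map Prod.fst)[i]'(by simpa using him) := getElem_congr rfl (by simp; omega) _
      _ = (P[i]'(by omega)).1 := List.getElem_map _
  -- snd component
  have hsnd : (G[k]'hkG).2 = nmin (P.map (pvE (P[i]'(by omega)).1)) := by
    have h2 : (G[k]'hkG).2 = (pvV (pvG q0) F.reverse)[k]'(by rw [pvV_length]; exact hkFr) := by
      calc (G[k]'hkG).2
          = (G.map Prod.snd)[k]'(by simpa [hGlen] using hkm) := (List.getElem_map _).symm
        _ = (pvV (pvG q0) F.reverse)[k]'(by rw [pvV_length]; exact hkFr) :=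
            List.getElem_of_eq hGsnd _
    rw [h2, pvV_getElem F.reverse (pvG q0) k hkFr]
    -- the x-coordinate under the subtraction
    have efrfst : F.reverse.map Prod.fst = (P.map Prod.fst).reverse := by
      rw [List.map_reverse, hFfst]
    have hxcoord : ((F.reverse[k]'hkFr)).1 = (P[i]'(by omega)).1 := by
      calc ((F.reverse[k]'hkFr)).1
          = (F.reverse.map Prod.fst)[k]'(by simpa using hkFr) := (List.getElem_map _).symm
        _ = ((P.map Prod.fst).reverse)[k]'(by simpa using hkm) := List.getElem_of_eq efrfst _
        _ = (P.map Prod.fst)[(P.map Prod.fst).length - 1 - k]'(by simp; omega) :=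
            List.getElem_reverse _
        _ = (P.map Prod.fst)[i]'(by simpa using him) := getElem_congr rfl (by simp; omega) _
        _ = (P[i]'(by omega)).1 := List.getElem_map _
    -- the take-map-g list is a take of the reversed pvT list
    have hTk : (F.reverse.take (k + 1)).map pvG = ((pvT (pvF p0) P).reverse).take (k + 1) := by
      rw [List.map_take, List.map_reverse, hFg]
    set T := pvT (pvF p0) P with hT
    have hTlen : T.length = m := by rw [hT, pvT_length]
    have hTtake : (T.reverse).take (k + 1) = (T.drop i).reverse := by
      have hidx : T.length - (k + 1) = i := by omega
      rw [List.take_reverse, hidx]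
    -- pvG q0 is the head of T.reverse, hence the head of its (k+1)-take
    have hq0T : pvG q0 ∈ (T.reverse).take (k + 1) := by
      have hTrev : T.reverse = F.reverse.map pvG := by
        rw [← hFg, List.map_reverse]
      rw [hTrev, hqR]
      simp [List.take_succ_cons]
    have hnm : nmin (pvG q0 :: (F.reverse.take (k + 1)).map pvG) = nmin (T.drop i) := by
      rw [hTk, nmin_dup _ _ hq0T, hTtake, nmin_reverse]
    rw [hnm, hxcoord]
    -- decompose T.drop i
    have hdropT : T.drop i = pvT ((P.take i).foldl (fun a c => min a (pvF c)) (pvF p0)) (P.drop i) := by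
      conv_lhs => rw [hT, ← List.take_append_drop i P, pvT_append]
      rw [List.drop_append_of_le_length (by rw [pvT_length, List.length_take]; omega)]
      rw [List.drop_eq_nil_of_le (by rw [pvT_length, List.length_take]; omega), List.nil_append]
    have hiP : i < P.length := by omega
    have hSdrop : P.drop i = (P[i]'hiP) :: P.drop (i + 1) := List.drop_eq_getElem_cons hiP
    have hpwS : ((P.drop i).map Prod.fst).Pairwise (· ≤ ·) := by
      rw [List.map_drop]
      exact hpw.drop
    rw [hdropT, hSdrop] at *
    have hTL := pv_TL (P.drop (i + 1)) (P[i]'hiP)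
      ((P.take i).foldl (fun a c => min a (pvF c)) (pvF p0)) (by rw [← hSdrop]; exact hpwS)
    rw [hTL]
    -- rewrite the carry
    have hfold : (P.take i).foldl (fun a c => min a (pvF c)) (pvF p0)
        = nmin (pvF p0 :: (P.take i).map pvF) := by
      rw [← List.foldl_map, foldl_min_nmin]
    have hcar := pv_carry P p0 ⟨by rw [hP]; simp, by rw [hP]; simp⟩ i hiP
    rw [hfold]
    have hsplit := pv_e_split P hpw i hiP
    rw [show (2 * (P[i]'hiP).1 + min (nmin (pvF p0 :: (P.take i).map pvF)) (pvF (P[i]'hiP)))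
        = (2 * (P[i]'hiP).1 + nmin ((P.take (i + 1)).map pvF)) from by rw [hcar]]
    rw [hsplit]
    omega
  rw [hgi]
  rw [List.getElem_map]
  have : G[k]'hkG = ((G[k]'hkG).1, (G[k]'hkG).2) := rfl
  rw [this, hfst, hsnd]

-- bridge: pvAbsMin through pvUnpack2 is nmin of the pvE-map
lemma pv_absmin_eq : ∀ (pts : List (List Int)) (x : Int),
    pvAbsMin x pts = nmin ((pts.map pvUnpack2).map (pvE x)) := by
  intro pts
  induction pts with
  | nil => intro x; rfl
  | cons p t ih =>
    intro x
    cases t with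
    | nil => simp [pvAbsMin, nmin, pvE]
    | cons q t' =>
      show min ((pvUnpack2 p).2 + |x - (pvUnpack2 p).1|) (pvAbsMin x (q :: t'))
        = nmin (pvE x (pvUnpack2 p) :: ((q :: t').map pvUnpack2).map (pvE x))
      rw [ih x, nmin_cons _ _ (by simp)]
      rfl

-- chain → pairwise on the unpacked x-coordinates
lemma pv_heads_pairwise (L : List (List Int)) (hlen : ∀ l ∈ L, l.length = 2)
    (hpw : L.Pairwise (· ≤ ·)) :
    ((L.map pvUnpack2).map Prod.fst).Pairwise (· ≤ ·) := by
  have hch := pv_heads_chain L hlen hpw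
  have : (L.map pvUnpack2).map Prod.fst = L.map (fun l => (pvUnpack2 l).1) := by
    rw [List.map_map]; rfl
  rw [this]
  exact hch.pairwise

-- every member of a pairwise-sorted list is ≤ its last element
lemma pv_mem_le_getLast : ∀ (S : List (List Int)), S.Pairwise (· ≤ ·) →
    ∀ gl, S.getLast? = some gl → ∀ x ∈ S, x ≤ gl := by
  intro S
  induction S with
  | nil => intro _ gl h; simp at h
  | cons a t ih =>
    intro hpw gl hgl x hx
    cases t with
    | nil =>
      simp at hgl hx
      subst hgl; subst hx
      exact le_rfl
    | cons b t' =>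
      rw [List.getLast?_cons_cons] at hgl
      rcases List.mem_cons.mp hx with rfl | hx'
      · exact (List.pairwise_cons.mp hpw).1 gl (List.mem_of_getLast? hgl)
      · exact ih (List.pairwise_cons.mp hpw).2 gl hgl x hx'

-- the common core: on length-2, x-sorted lists the two programs agree
lemma pv_main (rs2 : List (List Int))
    (hlen : ∀ l ∈ rs2, l.length = 2)
    (hch : List.IsChain (· ≤ ·) (rs2.map (fun l => (pvUnpack2 l).1)))
    (hpw2 : rs2.Pairwise (· ≤ ·)) :
    (match (match rs2 with
            | [] => ([] : List (List Int))
            | l :: rest => l :: pvFwdA (pvUnpack2 l).1 (pvUnpack2 l).2 rest).reverse with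
     | [] => (0 : Int)
     | l :: rest => pvBwdA (pvUnpack2 l).1 (pvUnpack2 l).2 0 rest)
    =
    (List.zip (rs2.map (fun l => ((pvUnpack2 l).1, pvAbsMin (pvUnpack2 l).1 rs2)))
              ((rs2.map (fun l => ((pvUnpack2 l).1, pvAbsMin (pvUnpack2 l).1 rs2))).drop 1)).foldl
      (fun res pr => max res (PySem.Int.floordiv (pr.1.2 + pr.2.2 + pr.2.1 - pr.1.1) 2)) 0 := by
  cases rs2 with
  | nil => rfl
  | cons l0 rest =>
    set p0 : Int × Int := pvUnpack2 l0 with hp0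
    set P : List (Int × Int) := (l0 :: rest).map pvUnpack2 with hPdef
    have hch' : List.IsChain (· ≤ ·) (p0.1 :: rest.map (fun l => (pvUnpack2 l).1)) := by
      simpa using hch
    -- A's forward loop = gF-chain
    have hA1 : pvFwdA p0.1 p0.2 rest =
        (pvChain pvGF (some p0) (rest.map pvUnpack2)).map (fun p => [p.1, p.2]) := by
      rw [pv_fwdA_chain rest p0.1 p0.2 (fun x hx => hlen x (List.mem_cons_of_mem _ hx)) hch']
    set F : List (Int × Int) := pvChain pvGF none P with hF
    have hFc : F = p0 :: pvChain pvGF (some p0) (rest.map pvUnpack2) := by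
      rw [hF, hPdef]; rfl
    have hl0 : l0 = [p0.1, p0.2] := pv_len2_eq l0 (hlen l0 List.mem_cons_self)
    have hrs3 : (l0 :: pvFwdA p0.1 p0.2 rest) = F.map (fun p => [p.1, p.2]) := by
      rw [hA1, hFc, List.map_cons, ← hl0]
    -- first components of F are the x-coordinates, still a chain
    have hFfst : F.map Prod.fst = (l0 :: rest).map (fun l => (pvUnpack2 l).1) := by
      rw [hF, pv_chain_fst, hPdef, List.map_map]
      rfl
    have hchF : List.IsChain (· ≤ ·) (F.map Prod.fst) := by rw [hFfst]; exact hch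
    have hFne : F ≠ [] := by rw [hFc]; simp
    -- split the reversed chain
    cases hFr : F.reverse with
    | nil => exact absurd (List.reverse_eq_nil_iff.mp hFr) hFne
    | cons q0 R =>
      -- A reads the reversed forward result
      have hmapFr : (F.map fun p => [p.1, p.2]).reverse
          = [q0.1, q0.2] :: R.map (fun p => [p.1, p.2]) := by
        rw [← List.map_reverse, hFr, List.map_cons]
      have hRlen : ∀ l ∈ R.map (fun p : Int × Int => [p.1, p.2]), l.length = 2 := by
        intro l hl
        obtain ⟨p, _, rfl⟩ := List.mem_map.mp hl
        rfl
      have hRch : List.IsChain (fun x y : Int => y ≤ x)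
          (q0.1 :: (R.map (fun p : Int × Int => [p.1, p.2])).map (fun l => (pvUnpack2 l).1)) := by
        have : List.IsChain (fun x y : Int => y ≤ x) ((F.map Prod.fst).reverse) := by
          rw [List.isChain_reverse]
          simpa using hchF
        rw [← List.map_reverse, hFr] at this
        simpa [List.map_map, Function.comp, pvUnpack2] using this
      have hRun : (R.map (fun p : Int × Int => [p.1, p.2])).map pvUnpack2 = R := by
        rw [List.map_map,
            (funext fun p => rfl : (pvUnpack2 ∘ fun p : Int × Int => [p.1, p.2]) = id),
            List.map_id]
      -- reduce A's side to foldl max over the peaks of the composed chain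
      have hA : (match (match (l0 :: rest : List (List Int)) with
            | [] => ([] : List (List Int))
            | l :: rest => l :: pvFwdA (pvUnpack2 l).1 (pvUnpack2 l).2 rest).reverse with
          | [] => (0 : Int)
          | l :: rest => pvBwdA (pvUnpack2 l).1 (pvUnpack2 l).2 0 rest)
          = List.foldl max 0 (pvPks (q0 :: pvChain pvGB (some q0) R)) := by
        simp only [← hp0, hrs3, hmapFr]
        rw [pv_unpack_pair q0]
        rw [pv_bwdA_chain _ q0.1 q0.2 0 hRlen hRch, hRun]
      rw [hA]
      -- B's side: zip fold = foldl max over forward peaks of the e-list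
      rw [pv_zip_fold]
      -- the e-list equals the reversed composed chain, by pv_main2
      have hPne : P ≠ [] := by rw [hPdef]; simp
      have hpwP : (P.map Prod.fst).Pairwise (· ≤ ·) :=
        pv_heads_pairwise (l0 :: rest) hlen hpw2
      have hmain2 := pv_main2 P hPne hpwP
      have hE : (l0 :: rest).map (fun l => ((pvUnpack2 l).1, pvAbsMin (pvUnpack2 l).1 (l0 :: rest)))
          = P.map (fun c => (c.1, nmin (P.map (pvE c.1)))) := by
        rw [hPdef, List.map_map]
        refine List.map_congr_left (fun l _ => ?_)
        simp only [Function.comp_apply]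
        rw [pv_absmin_eq]
      have hGrev : pvChain pvGB none F.reverse
          = (P.map (fun c => (c.1, nmin (P.map (pvE c.1))))).reverse := by
        rw [← hmain2, ← hF, List.reverse_reverse]
      rw [hE, ← List.reverse_reverse (P.map (fun c => (c.1, nmin (P.map (pvE c.1)))))]
      rw [← hGrev, hFr]
      show List.foldl max 0 (pvPks (q0 :: pvChain pvGB (some q0) R))
        = List.foldl max 0 (pvPksF (pvChain pvGB none (q0 :: R)).reverse)
      have hGc : pvChain pvGB none (q0 :: R) = q0 :: pvChain pvGB (some q0) R := rfl
      rw [hGc, pv_pksF_reverse, pv_foldl_max_reverse]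

-- ===== VERDICT (by name: the statement is the Claim_ definition above) =====
theorem maxBuilding_spec : Claim_equal_maxBuilding := by
  intro n restrictions _ hpre
  simp only [Spec_maxBuilding, maxBuilding, maxBuilding_alt]
  set S := @PySem.List.sorted (List Int) (List Int) List.instLinearOrder.toLT
    LinearOrder.toDecidableLT ([1, 0] :: restrictions) (fun l => l) false with hS
  have hSne : S ≠ [] := by
    rw [hS, Ne, @PySem.List.sorted_eq_nil_iff (List Int) (List Int) List.instLinearOrder.toLT
      LinearOrder.toDecidableLT]
    simp
  have hSlen : ∀ l ∈ S, l.length = 2 := by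
    intro l hl
    rw [hS, @PySem.List.mem_sorted (List Int) (List Int) List.instLinearOrder.toLT
      LinearOrder.toDecidableLT, List.mem_cons] at hl
    rcases hl with h | h
    · rw [h]; rfl
    · exact hpre l h
  have hSpw : S.Pairwise (· ≤ ·) := by
    rw [hS]
    exact PySem.List.sorted_pairwise ([1, 0] :: restrictions) (fun l => l)
  have hSch : List.IsChain (· ≤ ·) (S.map (fun l => (pvUnpack2 l).1)) :=
    pv_heads_chain S hSlen hSpw
  set rs2 := if (((PySem.List.pyGet? S (-1)).getD []).headD 0) < n then S ++ [[n, n - 1]] else S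
    with hrs2
  have hlen : ∀ l ∈ rs2, l.length = 2 := by
    rw [hrs2]
    split_ifs
    · intro l hl
      rcases List.mem_append.mp hl with h | h
      · exact hSlen l h
      · simp at h; rw [h]; rfl
    · exact hSlen
  have hch : List.IsChain (· ≤ ·) (rs2.map (fun l => (pvUnpack2 l).1)) := by
    rw [hrs2]
    split_ifs with hg
    · rw [List.map_append]
      rw [List.isChain_append]
      refine ⟨hSch, by simp, ?_⟩
      intro x hx y hy
      simp only [List.map_cons, List.map_nil, List.head?_cons, Option.mem_def,
        Option.some.injEq] at hy
      rw [List.getLast?_map] at hx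
      rw [pv_pyGet_neg_one S hSne] at hg
      cases hgl : S.getLast? with
      | none => rw [hgl] at hx; simp at hx
      | some l =>
        rw [hgl] at hx hg
        simp only [Option.map_some, Option.mem_def, Option.some.injEq] at hx
        simp only [Option.getD_some] at hg
        subst hx
        subst hy
        have h1 : (pvUnpack2 l).1 = l.headD 0 := rfl
        have h2 : (pvUnpack2 [n, n - 1]).1 = n := rfl
        rw [h1, h2]
        omega
    · exact hSch
  have hpw2 : rs2.Pairwise (· ≤ ·) := by
    rw [hrs2]
    split_ifs with hg
    · rw [List.pairwise_append]
      refine ⟨hSpw, by simp, ?_⟩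
      intro a ha b hb
      simp only [List.mem_singleton] at hb
      subst hb
      -- every element of S is ≤ [n, n-1] lexicographically since its head is < n
      rw [pv_pyGet_neg_one S hSne] at hg
      obtain ⟨gl, hgl⟩ : ∃ gl, S.getLast? = some gl := by
        cases hgl : S.getLast? with
        | none => exact absurd (List.getLast?_eq_none_iff.mp hgl) hSne
        | some l => exact ⟨l, rfl⟩
      rw [hgl] at hg
      simp only [Option.getD_some] at hg
      have hglmem : gl ∈ S := List.mem_of_getLast? hgl
      -- a ≤ gl : a is some element, gl the last; use pairwise via index order
      have hale : (pvUnpack2 a).1 ≤ (pvUnpack2 gl).1 := by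
        have h := pv_mem_le_getLast S hSpw gl hgl a ha
        rw [pv_len2_eq a (hSlen a ha), pv_len2_eq gl (hSlen gl hglmem)] at h
        exact pv_le_head _ _ _ _ h
      have h1 : (pvUnpack2 gl).1 = gl.headD 0 := rfl
      have hheada : (pvUnpack2 a).1 < n := by
        rw [h1] at hale
        omega
      rw [pv_len2_eq a (hSlen a ha)]
      exact le_of_lt (List.Lex.rel (by simpa using hheada))
    · exact hSpw
  exact pv_main rs2 hlen hch hpw2
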